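-- pv_equiv track=rewrite | github.com/dvrx47/sztuczna_inteligencja | P1/z1/funkcje.py | white_king_correct
-- ===== SOURCE A (Python) =====
-- def white_king_correct( turn ):
--     min_l = ord('a')
--     max_l = ord('h')
--
--     current_letter = ord( turn[3][0])
--     current_index = int(turn[3][1])
--
--     letters = [chr(x) for x in range(current_letter-1, current_letter+2 ) if min_l <= x <= max_l ]
--     indexes = [str(x) for x in range(current_index-1, current_index+2) if 1 <= x <= 8 ]
--
--     black_king_range = [l+i for l in letters for i in indexes ]
--
--     if turn[1] in black_king_range:
--         return False
--
--     if turn[1] == turn[2]: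
--         return False
--
--     return True
-- ===== SOURCE B (Python) =====
-- def white_king_correct(turn):
--     bk, target, wk = turn[1], turn[2], turn[3]
--     wc, wr = ord(wk[0]), int(wk[1])
--     near = (len(bk) == 2
--             and 'a' <= bk[0] <= 'h' and '1' <= bk[1] <= '8'
--             and abs(ord(bk[0]) - wc) <= 1
--             and abs(int(bk[1]) - wr) <= 1)
--     return not near and bk != target
-- ===== Notes on version B (the rewrite author's own statement) =====
-- stated objective: simpler
-- what changed: B replaces A's construction of the clipped 3x3 neighborhood square list and the membership scan by a direct closed-form check: the black king square must be a valid board square within Chebyshev distance 1 of the white king, plus the same turn[1]==turn[2] check.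
import Mathlib
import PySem

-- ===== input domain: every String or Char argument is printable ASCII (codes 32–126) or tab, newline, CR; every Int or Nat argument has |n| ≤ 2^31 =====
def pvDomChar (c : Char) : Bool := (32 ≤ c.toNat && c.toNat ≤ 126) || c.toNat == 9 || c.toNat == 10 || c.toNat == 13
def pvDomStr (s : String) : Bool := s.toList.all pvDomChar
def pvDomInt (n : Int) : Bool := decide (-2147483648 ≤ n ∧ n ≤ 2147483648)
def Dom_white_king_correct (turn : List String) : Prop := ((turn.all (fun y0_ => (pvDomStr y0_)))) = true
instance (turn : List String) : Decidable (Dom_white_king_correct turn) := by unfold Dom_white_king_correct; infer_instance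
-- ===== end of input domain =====

-- B replaces A's clipped 3x3 neighborhood square list + membership scan by a closed-form
-- valid-square-within-Chebyshev-distance-1 check (objective: simpler; same return value).

-- ===== PORT A =====
-- strings handled on the List Char side; 'turn[1] in black_king_range' is List.contains
def white_king_correct (turn : List String) : Bool :=
  let min_l : Int := 97   -- ord 'a'
  let max_l : Int := 104  -- ord 'h'
  let s3 := ((PySem.List.pyGet? turn 3).getD "").toList
  let current_letter : Int := ((s3.getD 0 ' ').toNat : Int)
  let current_index : Int := (PySem.Int.ofChars? [s3.getD 1 ' ']).getD 0
  let letters : List (List Char) :=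
    ((PySem.List.pyRange (current_letter - 1) (current_letter + 2) 1).filter
      (fun x => decide (min_l ≤ x ∧ x ≤ max_l))).map (fun x => [Char.ofNat x.toNat])
  let indexes : List (List Char) :=
    ((PySem.List.pyRange (current_index - 1) (current_index + 2) 1).filter
      (fun x => decide ((1 : Int) ≤ x ∧ x ≤ 8))).map (fun x => PySem.Int.toChars x)
  let black_king_range : List (List Char) :=
    letters.flatMap (fun l => indexes.map (fun i => l ++ i))
  let t1 := ((PySem.List.pyGet? turn 1).getD "").toList
  let t2 := ((PySem.List.pyGet? turn 2).getD "").toList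
  if black_king_range.contains t1 then false
  else if t1 = t2 then false
  else true

-- ===== PORT B =====
-- chars compared by code point, exactly Python's 'a' <= c <= 'h' / '1' <= c <= '8'
def white_king_correct_alt (turn : List String) : Bool :=
  let bk := ((PySem.List.pyGet? turn 1).getD "").toList
  let target := ((PySem.List.pyGet? turn 2).getD "").toList
  let wk := ((PySem.List.pyGet? turn 3).getD "").toList
  let wc : Int := ((wk.getD 0 ' ').toNat : Int)
  let wr : Int := (PySem.Int.ofChars? [wk.getD 1 ' ']).getD 0
  let near :=
    bk.length == 2 &&
    decide (97 ≤ (bk.getD 0 ' ').toNat ∧ (bk.getD 0 ' ').toNat ≤ 104) &&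
    decide (49 ≤ (bk.getD 1 ' ').toNat ∧ (bk.getD 1 ' ').toNat ≤ 56) &&
    decide ((((bk.getD 0 ' ').toNat : Int) - wc).natAbs ≤ 1) &&
    decide (((PySem.Int.ofChars? [bk.getD 1 ' ']).getD 0 - wr).natAbs ≤ 1)
  !near && !(bk == target)

-- ===== PRECONDITION & SPEC =====
-- Pre_ excludes exactly the inputs where A raises: fewer than 4 entries (IndexError on turn[3]),
-- turn[3] shorter than 2 chars (IndexError), or a non-digit turn[3][1] (ValueError in int()).
def Pre_white_king_correct (turn : List String) : Prop :=
  4 ≤ turn.length ∧ 2 ≤ (turn.getD 3 "").toList.length ∧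
  48 ≤ ((turn.getD 3 "").toList.getD 1 ' ').toNat ∧ ((turn.getD 3 "").toList.getD 1 ' ').toNat ≤ 57
instance (turn : List String) : Decidable (Pre_white_king_correct turn) := by
  unfold Pre_white_king_correct; infer_instance

def pvWitness_white_king_correct : List String := ["w", "a1", "b2", "c3"]

def Spec_white_king_correct (turn : List String) (out : Bool) : Prop := out = white_king_correct_alt turn
instance (turn : List String) (out : Bool) : Decidable (Spec_white_king_correct turn out) := by unfold Spec_white_king_correct; infer_instance

-- ===== CLAIM (what is proved, stated in full; the proofs are below) =====
def Claim_equal_white_king_correct : Prop := ∀ (turn : List String), Dom_white_king_correct turn → Pre_white_king_correct turn → Spec_white_king_correct turn (white_king_correct turn)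

-- ===== LEMMAS AND PROOFS =====

theorem range3 (a : Int) : PySem.List.pyRange (a-1) (a+2) 1 = [a-1, a, a+1] := by
  rw [PySem.List.pyRange_one]
  have h : (a+2-(a-1)).toNat = 3 := by omega
  rw [h]; simp [List.range_succ]; omega

theorem ofChars_digit (v : Char) (h1 : 48 ≤ v.toNat) (h2 : v.toNat ≤ 57) :
    PySem.Int.ofChars? [v] = some ((v.toNat : Int) - 48) := by
  obtain ⟨k, hk, rfl⟩ : ∃ k, k ≤ 9 ∧ v = Char.ofNat (48+k) := by
    refine ⟨v.toNat - 48, by omega, ?_⟩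
    have : 48 + (v.toNat - 48) = v.toNat := by omega
    rw [this, Char.ofNat_toNat]
  interval_cases k <;> decide

theorem toChars_small (y : Int) (h1 : 1 ≤ y) (h2 : y ≤ 8) :
    PySem.Int.toChars y = [Char.ofNat (48 + y.toNat)] := by
  interval_cases y <;> decide

-- membership of t1 in A's clipped neighborhood list equals B's closed-form check
theorem core (cl ci : Int) (t1 : List Char) :
    (((((PySem.List.pyRange (cl - 1) (cl + 2) 1).filter
        (fun x => decide ((97:Int) ≤ x ∧ x ≤ 104))).map (fun x => [Char.ofNat x.toNat])).flatMap
      (fun l => (((PySem.List.pyRange (ci - 1) (ci + 2) 1).filter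
        (fun x => decide ((1 : Int) ≤ x ∧ x ≤ 8))).map (fun x => PySem.Int.toChars x)).map
        (fun i => l ++ i))).contains t1) =
    (t1.length == 2 &&
     decide (97 ≤ (t1.getD 0 ' ').toNat ∧ (t1.getD 0 ' ').toNat ≤ 104) &&
     decide (49 ≤ (t1.getD 1 ' ').toNat ∧ (t1.getD 1 ' ').toNat ≤ 56) &&
     decide ((((t1.getD 0 ' ').toNat : Int) - cl).natAbs ≤ 1) &&
     decide (((PySem.Int.ofChars? [t1.getD 1 ' ']).getD 0 - ci).natAbs ≤ 1)) := by
  rw [Bool.eq_iff_iff]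
  simp only [List.contains_eq_mem, List.mem_flatMap, List.mem_map, List.mem_filter,
    range3 cl, range3 ci, decide_eq_true_eq, Bool.and_eq_true, beq_iff_eq, List.mem_cons,
    List.not_mem_nil, or_false]
  constructor
  · rintro ⟨l, ⟨x, ⟨hxm, hxb⟩, rfl⟩, i, ⟨y, ⟨hym, hyb⟩, rfl⟩, rfl⟩
    rw [toChars_small y hyb.1 hyb.2]
    have hcx : (Char.ofNat x.toNat).toNat = x.toNat := by
      have : x.toNat < 55296 := by omega
      simp [Char.toNat_ofNat, this]
    have hcy : (Char.ofNat (48 + y.toNat)).toNat = 48 + y.toNat := by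
      have : 48 + y.toNat < 55296 := by omega
      simp [Char.toNat_ofNat, this]
    have hv : PySem.Int.ofChars? [Char.ofNat (48 + y.toNat)] = some (((48 + y.toNat : Nat) : Int) - 48) := by
      rw [ofChars_digit _ (by rw [hcy]; omega) (by rw [hcy]; omega), hcy]
    simp only [List.cons_append, List.nil_append, List.getD, List.getElem?_cons_zero,
      List.getElem?_cons_succ, Option.getD_some, List.length_cons, List.length_nil, hv]
    simp only [hcx, hcy, true_and]
    omega
  · rintro ⟨⟨⟨⟨hlen, hu⟩, hv⟩, hdx⟩, hdy⟩
    match t1, hlen with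
    | [u, v], _ =>
    simp only [List.getD, List.getElem?_cons_zero, List.getElem?_cons_succ, Option.getD_some] at hu hv hdx hdy
    rw [ofChars_digit v (by omega) (by omega)] at hdy
    simp only [Option.getD_some] at hdy
    refine ⟨[Char.ofNat ((u.toNat : Int)).toNat], ⟨(u.toNat : Int), ⟨by omega, by omega, by omega⟩, rfl⟩,
      PySem.Int.toChars ((v.toNat : Int) - 48), ⟨((v.toNat : Int) - 48), ⟨by omega, by omega, by omega⟩, rfl⟩, ?_⟩
    rw [toChars_small _ (by omega) (by omega)]
    have h48 : 48 + ((v.toNat : Int) - 48).toNat = v.toNat := by omega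
    rw [h48, Char.ofNat_toNat, Int.toNat_natCast, Char.ofNat_toNat]
    rfl

-- ===== VERDICT (by name: the statement is the Claim_ definition above) =====
theorem white_king_correct_spec : Claim_equal_white_king_correct := by
  intro turn hdom hpre
  obtain ⟨hlen, hlen3, hdig⟩ := hpre
  match turn with
  | [] => simp at hlen
  | [_] => simp at hlen
  | [_, _] => simp at hlen
  | [_, _, _] => simp at hlen
  | t0 :: t1 :: t2 :: t3 :: r =>
  simp only [List.getD, List.getElem?_cons_zero, List.getElem?_cons_succ, Option.getD_some] at hlen3 hdig
  have hg1 : PySem.List.pyGet? (t0 :: t1 :: t2 :: t3 :: r) 1 = some t1 := by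
    simp only [PySem.List.pyGet?, PySem.List.pyIdx?]
    rw [if_pos (by omega)]
    rw [if_pos (by push_cast [List.length_cons]; omega)]
    rfl
  have hg2 : PySem.List.pyGet? (t0 :: t1 :: t2 :: t3 :: r) 2 = some t2 := by
    simp only [PySem.List.pyGet?, PySem.List.pyIdx?]
    rw [if_pos (by omega)]
    rw [if_pos (by push_cast [List.length_cons]; omega)]
    rfl
  have hg3 : PySem.List.pyGet? (t0 :: t1 :: t2 :: t3 :: r) 3 = some t3 := by
    simp only [PySem.List.pyGet?, PySem.List.pyIdx?]
    rw [if_pos (by omega)]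
    rw [if_pos (by push_cast [List.length_cons]; omega)]
    rfl
  unfold Spec_white_king_correct white_king_correct white_king_correct_alt
  simp only [hg1, hg2, hg3, Option.getD_some]
  rw [core]
  cases h : (t1.toList.length == 2 &&
     decide (97 ≤ (t1.toList.getD 0 ' ').toNat ∧ (t1.toList.getD 0 ' ').toNat ≤ 104) &&
     decide (49 ≤ (t1.toList.getD 1 ' ').toNat ∧ (t1.toList.getD 1 ' ').toNat ≤ 56) &&
     decide ((((t1.toList.getD 0 ' ').toNat : Int) - ((t3.toList.getD 0 ' ').toNat : Int)).natAbs ≤ 1) &&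
     decide (((PySem.Int.ofChars? [t1.toList.getD 1 ' ']).getD 0 -
              (PySem.Int.ofChars? [t3.toList.getD 1 ' ']).getD 0).natAbs ≤ 1))
  · by_cases he : t1.toList = t2.toList <;> simp [he]
  · simp
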